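-- pv_equiv track=rewrite | github.com/Bartveldkamp/mivalta-science-engine | training/scripts/prepare_v6_data.py | detect_mode
-- ===== SOURCE A (Python) =====
-- def detect_mode(example: dict) -> str:
--     """Detect whether an example is interpreter or coach mode."""
--     messages = example.get("messages", [])
--     for msg in messages:
--         if msg["role"] == "system":
--             content = msg["content"]
--             if "Interpreter" in content and "GATCRequest" in content:
--                 return "interpreter"
--             if "coaching assistant" in content.lower():
--                 return "coach"
--     # Check assistant response: if it starts with {, likely interpreter
--     for msg in messages:
--         if msg["role"] == "assistant":
--             if msg["content"].strip().startswith("{"):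
--                 return "interpreter"
--             return "coach"
--     return "unknown"
-- ===== SOURCE B (Python) =====
-- def detect_mode(example: dict) -> str:
--     """Detect whether an example is interpreter or coach mode (single pass)."""
--     messages = example.get("messages", [])
--     first_assistant = None
--     for msg in messages:
--         role = msg["role"]
--         if role == "system":
--             content = msg["content"]
--             if "Interpreter" in content and "GATCRequest" in content:
--                 return "interpreter"
--             if "coaching assistant" in content.lower():
--                 return "coach"
--         elif role == "assistant" and first_assistant is None:
--             first_assistant = msg
--     if first_assistant is not None:
--         if first_assistant["content"].strip().startswith("{"):
--             return "interpreter"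
--         return "coach"
--     return "unknown"
-- ===== Notes on version B (the rewrite author's own statement) =====
-- stated objective: simpler
-- what changed: A's two sequential scans over messages (system scan, then assistant scan) are fused into a single pass that answers system matches immediately and saves a reference to the first assistant message, judged only after the loop.
import Mathlib
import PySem

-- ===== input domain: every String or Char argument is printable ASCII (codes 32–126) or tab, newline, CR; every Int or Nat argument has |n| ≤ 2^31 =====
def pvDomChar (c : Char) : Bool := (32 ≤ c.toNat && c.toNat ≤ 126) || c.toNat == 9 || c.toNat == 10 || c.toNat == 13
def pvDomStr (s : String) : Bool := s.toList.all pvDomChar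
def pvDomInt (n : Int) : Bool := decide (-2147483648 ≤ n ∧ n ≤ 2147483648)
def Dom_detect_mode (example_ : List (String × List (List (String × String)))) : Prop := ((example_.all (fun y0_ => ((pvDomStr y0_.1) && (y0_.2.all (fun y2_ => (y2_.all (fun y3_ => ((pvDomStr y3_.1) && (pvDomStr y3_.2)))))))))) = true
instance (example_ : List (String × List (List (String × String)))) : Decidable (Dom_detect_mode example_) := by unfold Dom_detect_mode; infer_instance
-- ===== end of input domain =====

-- B folds A's two sequential scans into ONE pass that saves the first assistant message; objective: simpler single-pass decomposition (same asymptotic cost).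


-- msg[k]: first-match association-list lookup; the "" default is never read on inputs
-- admitted by Pre_detect_mode (Python raises KeyError there, which Pre_ excludes).
def pvGetD (m : List (String × String)) (k : String) : String :=
  (List.lookup k m).getD ""

-- ===== PORT A =====
-- first loop of A: scan for a deciding system message
def pvLoop1 : List (List (String × String)) → Option String
  | [] => none
  | m :: rest =>
    if pvGetD m "role" == "system" then
      let content := pvGetD m "content"
      if PySem.Str.isIn "Interpreter" content && PySem.Str.isIn "GATCRequest" content then
        some "interpreter"
      else if PySem.Str.isIn "coaching assistant" (PySem.Str.lower content) then
        some "coach"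
      else pvLoop1 rest
    else pvLoop1 rest

-- second loop of A: first assistant message decides by its content
def pvLoop2 : List (List (String × String)) → Option String
  | [] => none
  | m :: rest =>
    if pvGetD m "role" == "assistant" then
      some (if PySem.Str.startswith (PySem.Str.strip (pvGetD m "content")) "{" then "interpreter" else "coach")
    else pvLoop2 rest

def detect_mode (example_ : List (String × List (List (String × String)))) : String :=
  let messages := (List.lookup "messages" example_).getD []
  match pvLoop1 messages with
  | some r => r
  | none =>
    match pvLoop2 messages with
    | some r => r
    | none => "unknown"

-- ===== PORT B =====
-- B's single pass: system messages may return at once; the first assistant message is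
-- saved (the message itself, not its content) and judged only after the loop.
def pvLoopB : List (List (String × String)) → Option (List (String × String)) → String
  | [], acc =>
    match acc with
    | some m => if PySem.Str.startswith (PySem.Str.strip (pvGetD m "content")) "{" then "interpreter" else "coach"
    | none => "unknown"
  | m :: rest, acc =>
    let role := pvGetD m "role"
    if role == "system" then
      let content := pvGetD m "content"
      if PySem.Str.isIn "Interpreter" content && PySem.Str.isIn "GATCRequest" content then
        "interpreter"
      else if PySem.Str.isIn "coaching assistant" (PySem.Str.lower content) then
        "coach"
      else pvLoopB rest acc
    else if role == "assistant" && acc.isNone then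
      pvLoopB rest (some m)
    else
      pvLoopB rest acc

def detect_mode_alt (example_ : List (String × List (List (String × String)))) : String :=
  let messages := (List.lookup "messages" example_).getD []
  pvLoopB messages none

-- ===== PRECONDITION & SPEC =====
-- Python A raises KeyError on a message missing a key it reads; Pre_ requires every message
-- to have a "role" key, every system message a "content" key, and the first assistant
-- message (if any) a "content" key. This is slightly narrower than A's returning set: when
-- an early system message already decides, A returns even if a later message lacks these
-- keys — such inputs are excluded for a uniform, position-independent condition.
def Pre_detect_mode (example_ : List (String × List (List (String × String)))) : Prop :=
  let messages := (List.lookup "messages" example_).getD []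
  (messages.all (fun m => (List.lookup "role" m).isSome)) = true ∧
  (messages.all (fun m => !(List.lookup "role" m == some "system") || (List.lookup "content" m).isSome)) = true ∧
  ((messages.find? (fun m => List.lookup "role" m == some "assistant")).all
      (fun m => (List.lookup "content" m).isSome)) = true
instance (example_ : List (String × List (List (String × String)))) : Decidable (Pre_detect_mode example_) := by unfold Pre_detect_mode; infer_instance

def pvWitness_detect_mode : (List (String × List (List (String × String)))) :=
  [("messages", [[("role", "system"), ("content", "hello")], [("role", "assistant"), ("content", " {\"x\": 1}")]])]

def Spec_detect_mode (example_ : List (String × List (List (String × String)))) (out : String) : Prop := out = detect_mode_alt example_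
instance (example_ : List (String × List (List (String × String)))) (out : String) : Decidable (Spec_detect_mode example_ out) := by unfold Spec_detect_mode; infer_instance

-- ===== CLAIM (what is proved, stated in full; the proofs are below) =====
def Claim_equal_detect_mode : Prop := ∀ (example_ : List (String × List (List (String × String)))), Dom_detect_mode example_ → Pre_detect_mode example_ → Spec_detect_mode example_ (detect_mode example_)

-- ===== LEMMAS AND PROOFS =====

-- the verdict B pronounces after its loop, as a function of the saved assistant message
def pvFinish : Option (List (String × String)) → String
  | some m => if PySem.Str.startswith (PySem.Str.strip (pvGetD m "content")) "{" then "interpreter" else "coach"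
  | none => "unknown"

-- A's second loop is "first assistant message, judged"
lemma pvLoop2_eq_find (msgs : List (List (String × String))) :
    pvLoop2 msgs = (msgs.find? (fun m => pvGetD m "role" == "assistant")).map
      (fun m => if PySem.Str.startswith (PySem.Str.strip (pvGetD m "content")) "{" then "interpreter" else "coach") := by
  induction msgs with
  | nil => rfl
  | cons m rest ih =>
    simp only [pvLoop2, List.find?]
    by_cases h : (pvGetD m "role" == "assistant") = true
    · simp [h]
    · simp [h, ih]

-- B's loop = A's first loop, then the saved-or-first assistant verdict
lemma pvLoopB_eq (msgs : List (List (String × String))) (acc : Option (List (String × String))) :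
    pvLoopB msgs acc =
      match pvLoop1 msgs with
      | some r => r
      | none => pvFinish (acc.orElse (fun _ => msgs.find? (fun m => pvGetD m "role" == "assistant"))) := by
  induction msgs generalizing acc with
  | nil => cases acc <;> rfl
  | cons m rest ih =>
    by_cases hs : (pvGetD m "role" == "system") = true
    · have hrole : (pvGetD m "role" == "assistant") = false := by
        have h : pvGetD m "role" = "system" := by simpa using hs
        simp [h]
      simp only [pvLoopB, pvLoop1, List.find?, hs, hrole, if_true]
      split_ifs <;> simp [ih]
    · have hs' : (pvGetD m "role" == "system") = false := by simpa using hs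
      by_cases ha : (pvGetD m "role" == "assistant") = true
      · cases acc <;> simp [pvLoopB, pvLoop1, List.find?, hs', ha, ih, Option.orElse]
      · have ha' : (pvGetD m "role" == "assistant") = false := by simpa using ha
        simp [pvLoopB, pvLoop1, List.find?, hs', ha', ih]

-- ===== VERDICT (by name: the statement is the Claim_ definition above) =====
theorem detect_mode_spec : Claim_equal_detect_mode := by
  intro example_ _ _
  unfold Spec_detect_mode
  simp only [detect_mode, detect_mode_alt]
  rw [pvLoopB_eq]
  cases h1 : pvLoop1 ((List.lookup "messages" example_).getD []) with
  | some r => rfl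
  | none =>
    rw [pvLoop2_eq_find]
    cases hf : ((List.lookup "messages" example_).getD []).find? (fun m => pvGetD m "role" == "assistant") <;>
      simp [pvFinish, Option.orElse]
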